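-- pv_equiv track=rewrite | github.com/da-revo/genPassportScore | working version coz cached/get updated countries/createCountryList.py | workwithTemp
-- ===== SOURCE A (Python) =====
-- def workwithTemp(temp):
--     flag=False
--     for i in range(len(temp)):
--         if temp[i]=="|":
--             if temp[i+1]=='s':
--                 neutemp=temp[0:i]
--                 flag=True
--             if temp[i+1]=='n':
--                 neutemp=temp[i+6:len(temp)]
--                 flag=True
--     if flag==False:
--         neutemp=temp
--     return neutemp
-- ===== SOURCE B (Python) =====
-- def workwithTemp(temp):
--     # reverse scan: return at the LAST pipe followed by 's' or 'n'
--     for i in range(len(temp) - 1, -1, -1):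
--         if temp[i] == "|":
--             if temp[i + 1] == 's':
--                 return temp[:i]
--             if temp[i + 1] == 'n':
--                 return temp[i + 6:]
--     return temp
-- ===== Notes on version B (the rewrite author's own statement) =====
-- stated objective: simpler
-- what changed: Replaces the full forward pass with a flag and overwritten result by a reverse scan that returns directly at the last qualifying pipe (no flag, no overwriting).
-- outside the precondition, e.g. on workwithTemp('|'): A raises IndexError, B raises IndexError
import Mathlib
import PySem

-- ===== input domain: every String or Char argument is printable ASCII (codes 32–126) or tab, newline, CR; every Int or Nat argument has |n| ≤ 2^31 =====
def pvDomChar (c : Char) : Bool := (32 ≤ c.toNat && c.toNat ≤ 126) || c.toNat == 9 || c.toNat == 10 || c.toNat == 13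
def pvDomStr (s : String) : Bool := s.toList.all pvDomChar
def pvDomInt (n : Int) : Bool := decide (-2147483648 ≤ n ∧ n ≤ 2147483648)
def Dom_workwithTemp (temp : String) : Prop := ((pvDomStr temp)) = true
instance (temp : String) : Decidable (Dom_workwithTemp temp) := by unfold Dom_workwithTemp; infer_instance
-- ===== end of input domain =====

-- B replaces A's full forward pass with flag state by a reverse scan with early return (simpler).

-- ===== PORT A =====
-- state = (flag, neutemp); neutemp starts as "" (Python leaves it unbound, read only when flag is true)
def workwithTemp (temp : String) : String :=
  let n : Int := PySem.Str.len temp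
  let st := (PySem.List.pyRange 0 n 1).foldl (fun (st : Bool × String) i =>
    if PySem.Str.pyGet? temp i = some '|' then
      let st1 := if PySem.Str.pyGet? temp (i + 1) = some 's'
        then (true, PySem.Str.slice temp (some 0) (some i)) else st
      let st2 := if PySem.Str.pyGet? temp (i + 1) = some 'n'
        then (true, PySem.Str.slice temp (some (i + 6)) (some n)) else st1
      st2
    else st) (false, "")
  if st.1 = false then temp else st.2

-- ===== PORT B =====
-- reverse scan: workwithTempAltGo temp m inspects indices m-1, m-2, …, 0
def workwithTempAltGo (temp : String) : Nat → String
  | 0 => temp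
  | i + 1 =>
    if PySem.Str.pyGet? temp (i : Int) = some '|' then
      if PySem.Str.pyGet? temp ((i : Int) + 1) = some 's' then
        PySem.Str.slice temp none (some (i : Int))
      else if PySem.Str.pyGet? temp ((i : Int) + 1) = some 'n' then
        PySem.Str.slice temp (some ((i : Int) + 6)) none
      else workwithTempAltGo temp i
    else workwithTempAltGo temp i

def workwithTemp_alt (temp : String) : String :=
  workwithTempAltGo temp temp.toList.length

-- ===== PRECONDITION & SPEC =====
-- Pre_ excludes strings whose final character is '|': there Python A (and Python B) hit temp[i+1]
-- one past the end and raise IndexError.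
def Pre_workwithTemp (temp : String) : Prop := temp.toList.getLast? ≠ some '|'
instance (temp : String) : Decidable (Pre_workwithTemp temp) := by unfold Pre_workwithTemp; infer_instance

def pvWitness_workwithTemp : String := "a|sb"

def Spec_workwithTemp (temp : String) (out : String) : Prop := out = workwithTemp_alt temp
instance (temp : String) (out : String) : Decidable (Spec_workwithTemp temp out) := by unfold Spec_workwithTemp; infer_instance

-- ===== CLAIM (what is proved, stated in full; the proofs are below) =====
def Claim_equal_workwithTemp : Prop := ∀ (temp : String), Dom_workwithTemp temp → Pre_workwithTemp temp → Spec_workwithTemp temp (workwithTemp temp)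

-- ===== LEMMAS AND PROOFS =====

-- A's fold over range(0, m), followed by the flag test, equals B's reverse scan from index m-1.
theorem workwithTemp_go (temp : String) (m : Nat) :
    (let st := (PySem.List.pyRange 0 (m : Int) 1).foldl (fun (st : Bool × String) i =>
        if PySem.Str.pyGet? temp i = some '|' then
          let st1 := if PySem.Str.pyGet? temp (i + 1) = some 's'
            then (true, PySem.Str.slice temp (some 0) (some i)) else st
          let st2 := if PySem.Str.pyGet? temp (i + 1) = some 'n'
            then (true, PySem.Str.slice temp (some (i + 6)) (some (PySem.Str.len temp))) else st1
          st2
        else st) (false, "");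
      if st.1 = false then temp else st.2) = workwithTempAltGo temp m := by
  induction m with
  | zero => simp [PySem.List.pyRange_one_eq_nil, workwithTempAltGo]
  | succ m ih =>
    have hsplit : PySem.List.pyRange 0 ((m + 1 : Nat) : Int) 1
        = PySem.List.pyRange 0 (m : Int) 1 ++ [(m : Int)] := by
      push_cast
      exact PySem.List.pyRange_one_succ_right (by positivity)
    simp only [hsplit, List.foldl_append, List.foldl_cons, List.foldl_nil]
    by_cases hp : temp.toList[m]? = some '|'
    · by_cases hs : PySem.List.pyGet? temp.toList ((m : Int) + 1) = some 's'
      · simp [workwithTempAltGo, hp, hs, PySem.Str.slice]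
      · by_cases hn : PySem.List.pyGet? temp.toList ((m : Int) + 1) = some 'n'
        · -- temp[m+6:len(temp)] = temp[m+6:]
          have h6 : ((m : Int) + 6) = ((m + 6 : Nat) : Int) := by push_cast; ring
          have hsl : PySem.Str.slice temp (some ((m : Int) + 6)) (some (temp.length : Int))
              = PySem.Str.slice temp (some ((m : Int) + 6)) none := by
            apply String.toList_injective
            simp only [PySem.Str.slice, PySem.Chars.slice_eq_listSlice, String.toList_ofList]
            rw [h6, show (temp.length : Int) = ((temp.toList.length : Nat) : Int) by simp,
              PySem.List.slice_natCast, PySem.List.slice_from_natCast]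
            exact List.take_of_length_le (by simp)
          simp [workwithTempAltGo, hp, hn, hsl]
        · simpa [workwithTempAltGo, hp, hs, hn] using ih
    · simpa [workwithTempAltGo, hp] using ih

-- ===== VERDICT (by name: the statement is the Claim_ definition above) =====
theorem workwithTemp_spec : Claim_equal_workwithTemp := by
  intro temp _ _
  unfold Spec_workwithTemp workwithTemp workwithTemp_alt
  have h := workwithTemp_go temp temp.toList.length
  simpa [PySem.Str.len_eq] using h
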